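-- pv_equiv track=rewrite | github.com/Stunkymonkey/mobile-computing | uebung1/aufgabe1-2/sender.py | get_byte_string
-- ===== SOURCE A (Python) =====
-- def get_byte_string(char, thread_id):
--     if (thread_id == 1):
--         char = char.upper()
--     asc = ord(char)
--     byte = "{0:b}".format(asc)
--     while (len(byte) < 7):
--         byte = "0" + byte
--     return byte
-- ===== SOURCE B (Python) =====
-- def get_byte_string(char, thread_id):
--     if thread_id == 1:
--         char = char.upper()
--     asc = ord(char)
--     bits = ""
--     while asc > 0:
--         bits = str(asc & 1) + bits
--         asc >>= 1
--     if bits == "":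
--         bits = "0"
--     return bits.zfill(7)
-- ===== Notes on version B (the rewrite author's own statement) =====
-- stated objective: alternative
-- what changed: B replaces the library format('{0:b}') call plus a while-loop that prepends '0' with an explicit base-2 conversion loop (bits = str(asc & 1) + bits; asc >>= 1), a special case for asc == 0, and a single zfill(7) for the padding.
import Mathlib
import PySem

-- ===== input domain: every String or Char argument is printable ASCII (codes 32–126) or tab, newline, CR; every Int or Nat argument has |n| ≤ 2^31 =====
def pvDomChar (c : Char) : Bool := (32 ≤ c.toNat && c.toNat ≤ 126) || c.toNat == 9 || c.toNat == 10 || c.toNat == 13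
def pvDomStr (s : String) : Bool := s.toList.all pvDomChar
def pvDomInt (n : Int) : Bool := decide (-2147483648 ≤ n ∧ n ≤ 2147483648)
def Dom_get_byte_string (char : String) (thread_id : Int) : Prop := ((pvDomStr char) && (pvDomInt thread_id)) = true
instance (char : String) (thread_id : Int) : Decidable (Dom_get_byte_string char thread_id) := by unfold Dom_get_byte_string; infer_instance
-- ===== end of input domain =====

-- B replaces the library "{0:b}".format + prepend-pad loop with an explicit bit-extraction loop (asc & 1 / asc >>= 1) followed by zfill(7); same cost, different decomposition.

-- ===== PORT A =====
-- while (len(byte) < 7): byte = "0" + byte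
-- fuel 8 only makes the loop structurally total; it is never exhausted (each step grows the string)
def pvPadA : Nat → List Char → List Char
  | 0, byte => byte
  | fuel + 1, byte => if byte.length < 7 then pvPadA fuel ('0' :: byte) else byte

def get_byte_string (char : String) (thread_id : Int) : String :=
  let char := if thread_id == 1 then PySem.Str.upper char else char
  match char.toList with
  | [c] =>
    -- asc = ord(char); byte = "{0:b}".format(asc); pad loop
    String.ofList (pvPadA 8 (PySem.Int.toBinChars (c.toNat : Int)))
  | _ => ""  -- ord raises TypeError here; excluded by Pre_

-- ===== PORT B =====
-- while asc > 0: bits = str(asc & 1) + bits; asc >>= 1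
-- fuel 32 only makes the halving loop structurally total; it is never exhausted (asc < 2^21 for any Char)
def pvBitsB : Nat → Nat → List Char → List Char
  | 0, _, bits => bits
  | fuel + 1, asc, bits =>
      if 0 < asc then pvBitsB fuel (asc / 2) ((if asc % 2 == 1 then '1' else '0') :: bits) else bits

def get_byte_string_alt (char : String) (thread_id : Int) : String :=
  let char := if thread_id == 1 then PySem.Str.upper char else char
  if char.toList.length = 1 then
    let c := char.toList.headD ' '
    let bits := pvBitsB 32 c.toNat []
    let bits := if bits = [] then ['0'] else bits
    String.ofList (PySem.Chars.zfill bits 7)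
  else ""  -- ord raises TypeError here; excluded by Pre_

-- ===== PRECONDITION & SPEC =====
-- Pre_ excludes only strings whose length is not 1, on which Python's ord raises TypeError.
def Pre_get_byte_string (char : String) (thread_id : Int) : Prop := char.toList.length = 1
instance (char : String) (thread_id : Int) : Decidable (Pre_get_byte_string char thread_id) := by unfold Pre_get_byte_string; infer_instance
def pvWitness_get_byte_string : String × Int := ("a", 1)

def Spec_get_byte_string (char : String) (thread_id : Int) (out : String) : Prop := out = get_byte_string_alt char thread_id
instance (char : String) (thread_id : Int) (out : String) : Decidable (Spec_get_byte_string char thread_id out) := by unfold Spec_get_byte_string; infer_instance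

-- ===== CLAIM (what is proved, stated in full; the proofs are below) =====
def Claim_equal_get_byte_string : Prop := ∀ (char : String) (thread_id : Int), Dom_get_byte_string char thread_id → Pre_get_byte_string char thread_id → Spec_get_byte_string char thread_id (get_byte_string char thread_id)

-- ===== LEMMAS AND PROOFS =====

-- core agreement, per ASCII code
theorem pvCore_eq : ∀ n : Nat, n < 127 →
    pvPadA 8 (PySem.Int.toBinChars (n : Int)) =
      PySem.Chars.zfill (if pvBitsB 32 n [] = [] then ['0'] else pvBitsB 32 n []) 7 := by
  decide

theorem pvUpper_le (c : Char) (h : c.toNat ≤ 126) : (PySem.Chars.upperChar c).toNat ≤ 126 := by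
  simp only [PySem.Chars.upperChar, PySem.Chars.islower]
  split_ifs with h1
  · rw [Char.toNat_ofNat]; split_ifs <;> omega
  · exact h

-- ===== VERDICT (by name: the statement is the Claim_ definition above) =====
theorem get_byte_string_spec : Claim_equal_get_byte_string := by
  intro char thread_id hdom hpre
  unfold Spec_get_byte_string get_byte_string get_byte_string_alt
  have hpre' : char.toList.length = 1 := hpre
  obtain ⟨c, hc⟩ : ∃ c, char.toList = [c] := by
    match h : char.toList with
    | [c] => exact ⟨c, rfl⟩
    | [] => simp [h] at hpre'
    | _ :: _ :: _ => simp [h] at hpre'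
  have hdomc : pvDomChar c = true := by
    have : pvDomStr char = true := by
      unfold Dom_get_byte_string at hdom
      simp only [Bool.and_eq_true] at hdom
      exact hdom.1
    unfold pvDomStr at this
    rw [hc] at this
    simpa using this
  have hle : c.toNat ≤ 126 := by
    unfold pvDomChar at hdomc
    simp only [Bool.or_eq_true, Bool.and_eq_true, decide_eq_true_eq, beq_iff_eq] at hdomc
    omega
  cases hb : (thread_id == 1) with
  | true =>
    simp only [if_true]
    rw [show (PySem.Str.upper char).toList = [PySem.Chars.upperChar c] by
      rw [PySem.Str.toList_upper, hc]; rfl]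
    exact congrArg String.ofList (pvCore_eq _ (by have := pvUpper_le c hle; omega))
  | false =>
    simp only [Bool.false_eq_true, if_false]
    rw [hc]
    exact congrArg String.ofList (pvCore_eq _ (by omega))
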